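-- pv_equiv track=rewrite | github.com/broadinstitute/gatk | src/main/python/org/broadinstitute/hellbender/permutect/data/base_datum.py | bases_as_base5_int
-- ===== SOURCE A (Python) =====
-- MAX_NUM_BASES_FOR_ENCODING = 13
--
-- def truncate_bases_if_necessary(bases: str):
--     return bases if len(bases) <= MAX_NUM_BASES_FOR_ENCODING else bases[:MAX_NUM_BASES_FOR_ENCODING]
--
-- def bases_as_base5_int(bases: str) -> int:
--     power_of_5 = 1
--     bases_to_use = truncate_bases_if_necessary(bases)
--     result = 0
--     for nuc in bases_to_use:
--         coeff = 1 if nuc == 'A' else (2 if nuc == 'C' else (3 if nuc == 'G' else 4))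
--         result += power_of_5 * coeff
--         power_of_5 *= 5
--     return result
-- ===== SOURCE B (Python) =====
-- MAX_NUM_BASES_FOR_ENCODING = 13
--
-- def bases_as_base5_int(bases: str) -> int:
--     result = 0
--     for nuc in reversed(bases[:MAX_NUM_BASES_FOR_ENCODING]):
--         result = result * 5 + (1 if nuc == 'A' else (2 if nuc == 'C' else (3 if nuc == 'G' else 4)))
--     return result
-- ===== Notes on version B (the rewrite author's own statement) =====
-- stated objective: alternative
-- what changed: Evaluates the base-5 polynomial by Horner's rule over the reversed (truncated) string with a single accumulator, instead of a left-to-right loop maintaining an explicit power-of-5 variable.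
import Mathlib
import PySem

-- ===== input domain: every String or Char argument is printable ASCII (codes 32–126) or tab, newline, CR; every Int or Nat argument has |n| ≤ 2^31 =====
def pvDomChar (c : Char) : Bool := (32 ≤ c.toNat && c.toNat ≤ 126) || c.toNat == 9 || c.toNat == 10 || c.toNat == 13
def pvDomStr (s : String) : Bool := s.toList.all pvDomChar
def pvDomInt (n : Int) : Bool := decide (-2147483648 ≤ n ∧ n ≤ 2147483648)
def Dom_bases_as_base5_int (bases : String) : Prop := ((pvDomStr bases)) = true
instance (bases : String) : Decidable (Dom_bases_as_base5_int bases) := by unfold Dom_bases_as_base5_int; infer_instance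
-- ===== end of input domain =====

-- B replaces the explicit power-of-5 accumulator with Horner's rule over the reversed string (alternative decomposition, same cost).

-- ===== PORT A =====
def pvMaxNumBases : Int := 13

-- bases if len(bases) <= 13 else bases[:13]
def truncate_bases_if_necessary (bases : String) : String :=
  if (bases.toList.length : Int) ≤ pvMaxNumBases then bases
  else String.ofList (PySem.List.slice bases.toList none (some pvMaxNumBases))

def bases_as_base5_int (bases : String) : Int :=
  let bases_to_use := truncate_bases_if_necessary bases
  let st := bases_to_use.toList.foldl
    (fun (st : Int × Int) nuc =>
      let coeff : Int := if nuc = 'A' then 1 else (if nuc = 'C' then 2 else (if nuc = 'G' then 3 else 4))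
      (st.1 * 5, st.2 + st.1 * coeff))
    ((1 : Int), (0 : Int))
  st.2

-- ===== PORT B =====
def bases_as_base5_int_alt (bases : String) : Int :=
  (PySem.List.slice bases.toList none (some 13)).reverse.foldl
    (fun result nuc =>
      result * 5 + (if nuc = 'A' then 1 else (if nuc = 'C' then 2 else (if nuc = 'G' then 3 else 4))))
    0

-- ===== PRECONDITION & SPEC =====
def Spec_bases_as_base5_int (bases : String) (out : Int) : Prop := out = bases_as_base5_int_alt bases
instance (bases : String) (out : Int) : Decidable (Spec_bases_as_base5_int bases out) := by unfold Spec_bases_as_base5_int; infer_instance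

-- ===== CLAIM (what is proved, stated in full; the proofs are below) =====
def Claim_equal_bases_as_base5_int : Prop := ∀ (bases : String), Dom_bases_as_base5_int bases → Spec_bases_as_base5_int bases (bases_as_base5_int bases)

-- ===== LEMMAS AND PROOFS =====

def pvCoeff (nuc : Char) : Int :=
  if nuc = 'A' then 1 else (if nuc = 'C' then 2 else (if nuc = 'G' then 3 else 4))

-- little-endian value of a digit list
def pvH : List Char → Int
  | [] => 0
  | c :: t => pvCoeff c + 5 * pvH t

theorem pvA_foldl (l : List Char) (p r : Int) :
    (l.foldl (fun (st : Int × Int) nuc => (st.1 * 5, st.2 + st.1 * pvCoeff nuc)) (p, r)).2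
      = r + p * pvH l := by
  induction l generalizing p r with
  | nil => simp [pvH]
  | cons c t ih => simp [List.foldl, pvH, ih]; ring

theorem pvB_foldl (l : List Char) (a : Int) :
    l.reverse.foldl (fun result nuc => result * 5 + pvCoeff nuc) a
      = a * 5 ^ l.length + pvH l := by
  induction l generalizing a with
  | nil => simp [pvH]
  | cons c t ih =>
    simp [List.reverse_cons, List.foldl_append, ih, pvH]
    ring

theorem pvSliceTrunc (bases : String) :
    (truncate_bases_if_necessary bases).toList = PySem.List.slice bases.toList none (some 13) := by
  unfold truncate_bases_if_necessary pvMaxNumBases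
  split
  · rw [show (13 : Int) = ((13 : Nat) : Int) from rfl, PySem.List.slice_to_natCast]
    rename_i h
    rw [List.take_of_length_le (by omega)]
  · simp

-- ===== VERDICT (by name: the statement is the Claim_ definition above) =====
theorem bases_as_base5_int_spec : Claim_equal_bases_as_base5_int := by
  intro bases _
  show bases_as_base5_int bases = bases_as_base5_int_alt bases
  unfold bases_as_base5_int bases_as_base5_int_alt
  rw [show (fun (st : Int × Int) nuc =>
        (st.1 * 5, st.2 + st.1 * (if nuc = 'A' then 1 else (if nuc = 'C' then 2 else (if nuc = 'G' then 3 else 4)))))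
      = (fun (st : Int × Int) nuc => (st.1 * 5, st.2 + st.1 * pvCoeff nuc)) from rfl]
  rw [show (fun (result : Int) nuc =>
        result * 5 + (if nuc = 'A' then 1 else (if nuc = 'C' then 2 else (if nuc = 'G' then 3 else 4))))
      = (fun (result : Int) nuc => result * 5 + pvCoeff nuc) from rfl]
  simp only []
  rw [show (truncate_bases_if_necessary bases).toList = PySem.List.slice bases.toList none (some 13) from pvSliceTrunc bases]
  rw [pvA_foldl, pvB_foldl]
  simp
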